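-- pv_equiv track=rewrite | github.com/mohamadbastin/ACM | ACM_F2.py | a_maker
-- ===== SOURCE A (Python) =====
-- def a_maker(a):
--     b = []
--     for i in range(max(a)+1):
--         if i in a:
--             b.append(1)
--         elif i not in a:
--             b.append(0)
--     return b
-- ===== SOURCE B (Python) =====
-- def a_maker(a):
--     m = max(a)
--     b = [0] * (m + 1)
--     for x in a:
--         if x >= 0:
--             b[x] = 1
--     return b
-- ===== Notes on version B (the rewrite author's own statement) =====
-- stated objective: faster
-- what changed: B allocates the bitmap once and scatters each element of a into it in one pass, instead of scanning a for membership at every index of range(max(a)+1).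
import Mathlib
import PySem

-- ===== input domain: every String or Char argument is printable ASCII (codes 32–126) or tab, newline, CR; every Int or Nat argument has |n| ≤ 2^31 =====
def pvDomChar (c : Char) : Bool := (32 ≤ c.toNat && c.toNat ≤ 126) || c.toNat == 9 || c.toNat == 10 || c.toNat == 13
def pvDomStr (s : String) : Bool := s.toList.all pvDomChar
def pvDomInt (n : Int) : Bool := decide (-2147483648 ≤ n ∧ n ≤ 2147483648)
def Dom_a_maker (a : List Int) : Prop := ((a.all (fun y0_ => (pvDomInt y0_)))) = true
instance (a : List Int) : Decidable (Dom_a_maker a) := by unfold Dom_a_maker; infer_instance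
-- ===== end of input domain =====

-- B builds the bitmap once and scatters each element into it in one pass (O(n+m))
-- instead of scanning a for membership at every index of range(max(a)+1) (O(n*m)).

-- ===== PORT A =====
def a_maker (a : List Int) : List Int :=
  (PySem.List.pyRange 0 (((PySem.List.max? a (fun x => x)).getD 0) + 1) 1).foldl
    (fun b i =>
      if a.contains i then b ++ [1]
      else if !(a.contains i) then b ++ [0]
      else b) []

-- ===== PORT B =====
def a_maker_alt (a : List Int) : List Int :=
  a.foldl (fun b x => if 0 ≤ x then b.set x.toNat 1 else b)
    (List.replicate ((((PySem.List.max? a (fun x => x)).getD 0) + 1).toNat) 0)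

-- ===== PRECONDITION & SPEC =====
-- Pre_ excludes the empty list, on which Python A raises ValueError from max(a) (B raises identically).
def Pre_a_maker (a : List Int) : Prop := a ≠ []
instance (a : List Int) : Decidable (Pre_a_maker a) := by unfold Pre_a_maker; infer_instance
def pvWitness_a_maker : List Int := [0, 2]

def Spec_a_maker (a : List Int) (out : List Int) : Prop := out = a_maker_alt a
instance (a : List Int) (out : List Int) : Decidable (Spec_a_maker a out) := by unfold Spec_a_maker; infer_instance

-- ===== CLAIM (what is proved, stated in full; the proofs are below) =====
def Claim_equal_a_maker : Prop := ∀ (a : List Int), Dom_a_maker a → Pre_a_maker a → Spec_a_maker a (a_maker a)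

-- ===== LEMMAS AND PROOFS =====

-- A's loop appends the membership indicator for each index of the range.
theorem appendLoop_eq_map (a : List Int) (L : List Int) (b0 : List Int) :
    L.foldl (fun b i =>
      if a.contains i then b ++ [1]
      else if !(a.contains i) then b ++ [0]
      else b) b0
    = b0 ++ L.map (fun i => if a.contains i then (1 : Int) else 0) := by
  induction L generalizing b0 with
  | nil => simp
  | cons x t ih =>
    rw [List.foldl_cons, ih]
    by_cases h : x ∈ a <;> simp [h]

-- B's scatter loop: at any in-range position the result is 1 iff that index occurs in l.
theorem scatter_get (l : List Int) (b : List Int) (i : Nat) (hi : i < b.length) :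
    (l.foldl (fun b x => if 0 ≤ x then b.set x.toNat 1 else b) b)[i]?
      = if (i : Int) ∈ l then some 1 else b[i]? := by
  induction l generalizing b with
  | nil => simp
  | cons x t ih =>
    have hlen : (if 0 ≤ x then b.set x.toNat 1 else b).length = b.length := by
      split <;> simp
    rw [List.foldl_cons, ih _ (by omega)]
    by_cases ht : (i : Int) ∈ t
    · simp [ht]
    · by_cases hx : x = (i : Int)
      · subst hx
        simp [ht, hi]
      · have hix : ((i : Int)) ≠ x := fun h => hx h.symm
        have hnc : (i : Int) ∉ (x :: t) := by simp [ht, hix]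
        rw [if_neg ht, if_neg hnc]
        split
        · rename_i hx0
          exact List.getElem?_set_ne (by omega)
        · rfl

theorem scatter_length (l : List Int) (b : List Int) :
    (l.foldl (fun b x => if 0 ≤ x then b.set x.toNat 1 else b) b).length = b.length := by
  induction l generalizing b with
  | nil => rfl
  | cons x t ih =>
    rw [List.foldl_cons, ih]
    split <;> simp

-- ===== VERDICT (by name: the statement is the Claim_ definition above) =====
theorem a_maker_spec : Claim_equal_a_maker := by
  intro a _ _
  unfold Spec_a_maker a_maker a_maker_alt
  set m : Int := (PySem.List.max? a (fun x => x)).getD 0 with hm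
  set n : Nat := (m + 1).toNat with hn
  rw [appendLoop_eq_map, List.nil_append, PySem.List.pyRange_one]
  have hrange : (m + 1 - 0).toNat = n := by omega
  rw [hrange]
  apply List.ext_getElem?
  intro i
  have hlenB : (a.foldl (fun b x => if 0 ≤ x then b.set x.toNat 1 else b)
      (List.replicate n (0 : Int))).length = n := by
    rw [scatter_length]; simp
  by_cases hi : i < n
  · rw [scatter_get _ _ _ (by simpa using hi)]
    by_cases hmem : (i : Int) ∈ a
    · simp [hmem, List.getElem?_map, List.getElem?_range hi]
    · simp [hmem, hi]
  · have h2 : (a.foldl (fun b x => if 0 ≤ x then b.set x.toNat 1 else b)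
        (List.replicate n (0 : Int)))[i]? = none := by
      rw [List.getElem?_eq_none_iff, hlenB]; omega
    rw [h2, List.getElem?_eq_none_iff]
    simp; omega
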